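-- pv_equiv track=rewrite | github.com/robin-oval/compas_quad | src/compas_quad/utilities.py | sublist_from_to_items_in_closed_list
-- ===== SOURCE A (Python) =====
-- def list_split(in_list, indices):
--     """Split list at given indices.
--     Closed lists have the same first and last elements.
--     If the list is closed, splitting wraps around if the first or last index is not in the indices to split.
--
--
--     Parameters
--     ----------
--     in_list : list
--             A list.
--     indices : list
--             A list of indices to split.
--
--     Returns
--     -------
--     split_lists : list
--             Nest lists from splitting the list at the given indices.
--
--     """
--
--     n = len(in_list)
--
--     if in_list[0] == in_list[-1]:
--         closed = True
--         if n - 1 in indices: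
--             indices.remove(n - 1)
--             if 0 not in indices:
--                 indices.append(0)
--     else:
--         closed = False
--
--     indices = list(sorted(set(indices)))
--
--     split_lists = []
--     current_list = []
--     for index, item in enumerate(in_list):
--         current_list.append(item)
--         if (index in indices and index != 0) or index == n - 1:
--             split_lists.append(current_list)
--             current_list = [item]
--
--     if closed:
--         if 0 not in indices:
--             start = split_lists.pop(0)[1:]
--             split_lists[-1] += start
--
--     return split_lists
--
-- def sublist_from_to_items_in_closed_list(l, from_item, to_item):
--     """Return sublist between oe item to another.
--
--     Parameters
--     ----------
--     l : list
--             A list.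
--     from_item
--             An item to be found in the list. The beginning of the sublist.
--     to_item
--             An item to be found in the list. The end of the sublist.
--
--     Returns
--     -------
--     sublist : list
--             A sublist from the input list, between from_item and to_item.
--     """
--
--     if from_item == to_item:
--         return [from_item]
--     if l[0] != l[-1]:
--         l.append(l[0])
--     from_idx = l.index(from_item)
--     to_idx = l.index(to_item)
--     sublists = list_split(l, [from_idx, to_idx])
--
--     for sublist in sublists:
--         if sublist[0] == from_item:
--             return sublist
-- ===== SOURCE B (Python) =====
-- def sublist_from_to_items_in_closed_list(l, from_item, to_item):
--     """Sublist of the closed list l from from_item to to_item (inclusive),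
--     computed directly by index comparison and slicing instead of splitting
--     the list into all pieces and scanning for the right one.
--     Performs the same in-place closing append on l as the original."""
--     if from_item == to_item:
--         return [from_item]
--     if l[0] != l[-1]:
--         l.append(l[0])
--     from_idx = l.index(from_item)
--     to_idx = l.index(to_item)
--     if from_idx <= to_idx:
--         return l[from_idx:to_idx + 1]
--     return l[from_idx:-1] + l[:to_idx + 1]
-- ===== Notes on version B (the rewrite author's own statement) =====
-- stated objective: simpler
-- what changed: Drops the list_split helper entirely: instead of building every split piece with an enumerate loop, merging the wraparound piece, and scanning the pieces for the one starting with from_item, B compares the two first-occurrence indices once and returns a single slice (or two concatenated slices for the wraparound case).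
import Mathlib
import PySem

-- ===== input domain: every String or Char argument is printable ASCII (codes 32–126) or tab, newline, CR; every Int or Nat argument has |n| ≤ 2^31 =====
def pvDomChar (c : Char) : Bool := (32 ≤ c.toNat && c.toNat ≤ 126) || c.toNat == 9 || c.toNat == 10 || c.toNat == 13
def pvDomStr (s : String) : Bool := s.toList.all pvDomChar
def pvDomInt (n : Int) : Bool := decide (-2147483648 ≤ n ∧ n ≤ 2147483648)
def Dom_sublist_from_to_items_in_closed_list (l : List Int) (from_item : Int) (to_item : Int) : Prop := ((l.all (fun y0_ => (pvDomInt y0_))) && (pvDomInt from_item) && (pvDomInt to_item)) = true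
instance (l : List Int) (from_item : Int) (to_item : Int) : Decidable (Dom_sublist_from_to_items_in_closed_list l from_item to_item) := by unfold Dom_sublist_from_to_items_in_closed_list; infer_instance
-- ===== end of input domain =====

-- B replaces A's list_split-then-scan (build every split piece, merge the wraparound piece,
-- scan for the piece starting with from_item) by one index comparison and direct slicing (objective: simpler).
-- Both A and B mutate the Python argument l identically (the closing append); the claim is about the return value.

-- ===== PORT A =====
-- loop body of list_split's enumerate loop (literal; S = split indices, n = len(in_list))
def pvStep (S : List Int) (n : Int) (st : List (List Int) × List Int) (p : Int × Int) :
    List (List Int) × List Int :=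
  let cur := st.2 ++ [p.2]
  if (p.1 ∈ S ∧ p.1 ≠ 0) ∨ p.1 = n - 1 then (st.1 ++ [cur], [p.2]) else (st.1, cur)

-- literal port of list_split (Python raises where the port falls to []; those inputs are outside Pre_)
def pvListSplit (in_list : List Int) (indices0 : List Int) : List (List Int) :=
  let n : Int := in_list.length
  let closed : Bool := PySem.List.pyGet? in_list 0 == PySem.List.pyGet? in_list (-1)
  let indices1 : List Int :=
    if closed then
      if (n - 1) ∈ indices0 then
        let r := indices0.erase (n - 1)
        if (0 : Int) ∈ r then r else r ++ [0]
      else indices0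
    else indices0
  let indices : List Int := PySem.List.sorted (PySem.List.dedup indices1) (fun x => x) false
  let st := (PySem.List.enumerate in_list 0).foldl (pvStep indices n) ([], [])
  let split_lists := st.1
  if closed = true ∧ (0 : Int) ∉ indices then
    match split_lists with
    | [] => []            -- Python: IndexError (unreachable under Pre_)
    | s :: rest =>
      match rest with
      | [] => []          -- Python: IndexError (unreachable under Pre_)
      | _ :: _ => rest.dropLast ++ [rest.getLast! ++ s.drop 1]
  else split_lists

def sublist_from_to_items_in_closed_list (l : List Int) (from_item : Int) (to_item : Int) : List Int :=
  if from_item = to_item then [from_item]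
  else
    let l2 : List Int :=
      if PySem.List.pyGet? l 0 ≠ PySem.List.pyGet? l (-1) then
        l ++ [(PySem.List.pyGet? l 0).getD 0]
      else l
    match PySem.List.index? l2 from_item, PySem.List.index? l2 to_item with
    | some from_idx, some to_idx =>
        let sublists := pvListSplit l2 [(from_idx : Int), (to_idx : Int)]
        -- for sublist in sublists: if sublist[0] == from_item: return sublist  (else Python returns None, outside Pre_)
        (sublists.find? (fun s => PySem.List.pyGet? s 0 == some from_item)).getD []
    | _, _ => []          -- Python: ValueError (unreachable under Pre_)

-- ===== PORT B =====
def sublist_from_to_items_in_closed_list_alt (l : List Int) (from_item : Int) (to_item : Int) : List Int :=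
  if from_item = to_item then [from_item]
  else
    let l2 : List Int :=
      if PySem.List.pyGet? l 0 ≠ PySem.List.pyGet? l (-1) then
        l ++ [(PySem.List.pyGet? l 0).getD 0]
      else l
    match PySem.List.index? l2 from_item with
    | none => []          -- Python: ValueError (unreachable under Pre_)
    | some from_idx =>
      match PySem.List.index? l2 to_item with
      | none => []        -- Python: ValueError (unreachable under Pre_)
      | some to_idx =>
        if from_idx ≤ to_idx then
          PySem.List.slice l2 (some (from_idx : Int)) (some ((to_idx : Int) + 1))
        else
          PySem.List.slice l2 (some (from_idx : Int)) (some (-1)) ++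
            PySem.List.slice l2 none (some ((to_idx : Int) + 1))

-- ===== PRECONDITION & SPEC =====
-- Pre_ excludes exactly the inputs on which Python A raises: an empty l (IndexError) or an item
-- absent from l (ValueError from .index), both only reached when from_item ≠ to_item.
def Pre_sublist_from_to_items_in_closed_list (l : List Int) (from_item : Int) (to_item : Int) : Prop :=
  from_item = to_item ∨ (l ≠ [] ∧ from_item ∈ l ∧ to_item ∈ l)
instance (l : List Int) (from_item : Int) (to_item : Int) : Decidable (Pre_sublist_from_to_items_in_closed_list l from_item to_item) := by unfold Pre_sublist_from_to_items_in_closed_list; infer_instance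

def pvWitness_sublist_from_to_items_in_closed_list : List Int × Int × Int := ([1, 2, 3], 1, 3)

def Spec_sublist_from_to_items_in_closed_list (l : List Int) (from_item : Int) (to_item : Int) (out : List Int) : Prop := out = sublist_from_to_items_in_closed_list_alt l from_item to_item
instance (l : List Int) (from_item : Int) (to_item : Int) (out : List Int) : Decidable (Spec_sublist_from_to_items_in_closed_list l from_item to_item out) := by unfold Spec_sublist_from_to_items_in_closed_list; infer_instance

-- ===== CLAIM (what is proved, stated in full; the proofs are below) =====
def Claim_equal_sublist_from_to_items_in_closed_list : Prop := ∀ (l : List Int) (from_item : Int) (to_item : Int), Dom_sublist_from_to_items_in_closed_list l from_item to_item → Pre_sublist_from_to_items_in_closed_list l from_item to_item → Spec_sublist_from_to_items_in_closed_list l from_item to_item (sublist_from_to_items_in_closed_list l from_item to_item)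

-- ===== LEMMAS AND PROOFS =====

-- running the split loop over a chunk with no break index just extends the current piece
theorem pvRunNoBreak (S : List Int) (n : Int) (chunk : List (Int × Int))
    (h : ∀ p ∈ chunk, ¬((p.1 ∈ S ∧ p.1 ≠ 0) ∨ p.1 = n - 1)) (acc : List (List Int)) (cur : List Int) :
    chunk.foldl (pvStep S n) (acc, cur) = (acc, cur ++ chunk.map Prod.snd) := by
  induction chunk generalizing cur with
  | nil => simp
  | cons p ps ih =>
    have hp := h p (by simp)
    simp only [List.foldl_cons, pvStep, if_neg hp]
    rw [ih (fun q hq => h q (by simp [hq]))]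
    simp
-- a chunk whose last index breaks closes exactly one piece
theorem pvRunChunk (S : List Int) (n : Int) (body : List (Int × Int)) (q : Int × Int)
    (hbody : ∀ p ∈ body, ¬((p.1 ∈ S ∧ p.1 ≠ 0) ∨ p.1 = n - 1))
    (hq : (q.1 ∈ S ∧ q.1 ≠ 0) ∨ q.1 = n - 1) (acc : List (List Int)) (cur : List Int) :
    (body ++ [q]).foldl (pvStep S n) (acc, cur)
      = (acc ++ [cur ++ body.map Prod.snd ++ [q.2]], [q.2]) := by
  rw [List.foldl_append, pvRunNoBreak S n body hbody acc cur]
  simp only [List.foldl_cons, List.foldl_nil, pvStep, if_pos hq]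

-- enumerate zs s ends with (s + len - 1, last)
theorem pvEnumLast (zs : List Int) (h : zs ≠ []) (s : Int) :
    PySem.List.enumerate zs s
      = PySem.List.enumerate zs.dropLast s ++ [(s + zs.length - 1, zs.getLast h)] := by
  conv_lhs => rw [← List.dropLast_append_getLast h]
  rw [PySem.List.enumerate_append]
  have hl : s + (zs.dropLast.length : Int) = s + (zs.length : Int) - 1 := by
    have h1 : zs.length ≠ 0 := by simpa using h
    have h2 : zs.dropLast.length = zs.length - 1 := List.length_dropLast
    omega
  simp only [PySem.List.enumerate_cons, PySem.List.enumerate_nil, hl]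

-- running the loop over the enumeration of a block that breaks exactly at its last element
theorem pvRunEnum (S : List Int) (n : Int) (zs : List Int) (h : zs ≠ []) (s : Int)
    (hbody : ∀ k : Nat, k + 1 < zs.length → ¬((s + k ∈ S ∧ s + (k:Int) ≠ 0) ∨ s + (k:Int) = n - 1))
    (hlast : ((s + zs.length - 1) ∈ S ∧ s + (zs.length:Int) - 1 ≠ 0) ∨ s + (zs.length:Int) - 1 = n - 1)
    (acc : List (List Int)) (cur : List Int) :
    (PySem.List.enumerate zs s).foldl (pvStep S n) (acc, cur)
      = (acc ++ [cur ++ zs], [zs.getLast h]) := by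
  rw [pvEnumLast zs h s]
  rw [pvRunChunk S n _ _ ?hb (by simpa using hlast) acc cur]
  · congr 1
    rw [PySem.List.map_snd_enumerate]
    simp [List.dropLast_append_getLast h]
  case hb =>
    intro p hp
    rcases (PySem.List.mem_enumerate_iff _ _ _).1 hp with ⟨k, hk, rfl⟩
    have hk' : k + 1 < zs.length := by
      have h2 : zs.dropLast.length = zs.length - 1 := List.length_dropLast
      omega
    exact hbody k hk'

theorem pvRunCase1 (m : List Int) (S : List Int) (j : Nat) (n : Int)
    (hn : n = (m.length : Int))
    (h0 : 0 < j) (hjn : j + 1 < m.length)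
    (hS : ∀ k : Int, k ∈ S ↔ k = (0:Int) ∨ k = (j:Int)) :
    ((PySem.List.enumerate m 0).foldl (pvStep S n) ([], [])).1
      = [m.take (j+1), m.drop j] := by
  have hdec : m = m.take (j+1) ++ m.drop (j+1) := (List.take_append_drop _ _).symm
  have hlen1 : (m.take (j+1)).length = j + 1 := by
    rw [List.length_take]; omega
  have hne1 : m.take (j+1) ≠ [] := by
    intro hc; have := congrArg List.length hc; simp [hlen1] at this
  have hne2 : m.drop (j+1) ≠ [] := by
    intro hc; have := congrArg List.length hc; simp at this; omega
  conv_lhs => rw [hdec]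
  rw [PySem.List.enumerate_append, List.foldl_append]
  rw [pvRunEnum S n _ hne1 0 ?hb1 ?hl1 [] []]
  rw [pvRunEnum S n _ hne2 _ ?hb2 ?hl2]
  · have hgl : (m.take (j+1)).getLast hne1 = m[j]'(by omega) := by
      rw [List.getLast_eq_getElem]
      simp [hlen1, List.getElem_take]
    have hdrop : m.drop j = m[j]'(by omega) :: m.drop (j+1) := List.drop_eq_getElem_cons (by omega)
    simp only [List.nil_append, List.singleton_append]
    rw [hgl, ← hdrop]
  case hb1 =>
    intro k hk
    rw [hlen1] at hk
    simp only [hS, hn]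
    intro hc
    rcases hc with (⟨h1 | h1, h2⟩ | h1) <;> omega
  case hl1 =>
    left
    rw [hlen1]
    refine ⟨(hS _).2 (Or.inr (by push_cast; ring)), by push_cast; omega⟩
  case hb2 =>
    intro k hk
    have hk' : j + 1 + k < m.length - 1 := by
      have : (m.drop (j+1)).length = m.length - (j+1) := by simp
      omega
    simp only [hS, hlen1, hn]
    push_cast
    intro hc
    rcases hc with (⟨h1 | h1, h2⟩ | h1) <;> omega
  case hl2 =>
    right
    have hdl : (m.drop (j+1)).length = m.length - (j+1) := by simp
    rw [hlen1, hdl, hn]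
    push_cast
    omega

theorem pvRunCase2 (m : List Int) (S : List Int) (i j : Nat) (n : Int)
    (hn : n = (m.length : Int))
    (h0 : 0 < i) (hij : i < j) (hjn : j + 1 < m.length)
    (hS : ∀ k : Int, k ∈ S ↔ k = (i:Int) ∨ k = (j:Int)) :
    ((PySem.List.enumerate m 0).foldl (pvStep S n) ([], [])).1
      = [m.take (i+1), (m.drop i).take (j-i+1), m.drop j] := by
  have hdl : (m.drop (i+1)).length = m.length - (i+1) := by simp
  have hdec : m = m.take (i+1) ++ ((m.drop (i+1)).take (j-i) ++ m.drop (j+1)) := by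
    have h1 : (m.drop (i+1)).drop (j-i) = m.drop (j+1) := by
      rw [List.drop_drop]; congr 1; omega
    rw [← h1, List.take_append_drop, List.take_append_drop]
  have hlen1 : (m.take (i+1)).length = i + 1 := by rw [List.length_take]; omega
  have hlen2 : ((m.drop (i+1)).take (j-i)).length = j - i := by
    rw [List.length_take]; omega
  have hne1 : m.take (i+1) ≠ [] := by
    intro hc; have := congrArg List.length hc; simp [hlen1] at this
  have hne2 : (m.drop (i+1)).take (j-i) ≠ [] := by
    intro hc; have := congrArg List.length hc; rw [hlen2] at this; simp at this; omega
  have hne3 : m.drop (j+1) ≠ [] := by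
    intro hc; have := congrArg List.length hc; simp at this; omega
  conv_lhs => rw [hdec]
  rw [PySem.List.enumerate_append, PySem.List.enumerate_append, List.foldl_append, List.foldl_append]
  rw [pvRunEnum S n _ hne1 0 ?hb1 ?hl1 [] []]
  rw [pvRunEnum S n _ hne2 _ ?hb2 ?hl2]
  rw [pvRunEnum S n _ hne3 _ ?hb3 ?hl3]
  · have hgl1 : (m.take (i+1)).getLast hne1 = m[i]'(by omega) := by
      rw [List.getLast_eq_getElem]; simp [hlen1, List.getElem_take]
    have hgl2 : ((m.drop (i+1)).take (j-i)).getLast hne2 = m[j]'(by omega) := by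
      rw [List.getLast_eq_getElem]
      simp only [hlen2, List.getElem_take, List.getElem_drop]
      congr 1
      omega
    have hdropi : m.drop i = m[i]'(by omega) :: m.drop (i+1) := List.drop_eq_getElem_cons (by omega)
    have hdropj : m.drop j = m[j]'(by omega) :: m.drop (j+1) := List.drop_eq_getElem_cons (by omega)
    have hmid : (m.drop i).take (j-i+1) = m[i]'(by omega) :: (m.drop (i+1)).take (j-i) := by
      rw [hdropi, List.take_succ_cons]
    simp only [List.nil_append, List.singleton_append]
    rw [hgl1, hgl2, ← hmid, ← hdropj]
    rfl
  case hb1 =>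
    intro k hk
    rw [hlen1] at hk
    simp only [hS, hn]
    intro hc
    rcases hc with (⟨h1 | h1, h2⟩ | h1) <;> omega
  case hl1 =>
    left
    rw [hlen1]
    refine ⟨(hS _).2 (Or.inl (by push_cast; ring)), by push_cast; omega⟩
  case hb2 =>
    intro k hk
    rw [hlen2] at hk
    simp only [hS, hlen1, hn]
    push_cast
    intro hc
    rcases hc with (⟨h1 | h1, h2⟩ | h1) <;> omega
  case hl2 =>
    left
    rw [hlen1, hlen2]
    constructor
    · refine (hS _).2 (Or.inr ?_)
      push_cast
      omega
    · push_cast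
      omega
  case hb3 =>
    intro k hk
    have hk' : (m.drop (j+1)).length = m.length - (j+1) := by simp
    simp only [hS, hlen1, hlen2, hn]
    push_cast
    intro hc
    rcases hc with (⟨h1 | h1, h2⟩ | h1) <;> omega
  case hl3 =>
    right
    have hdl3 : (m.drop (j+1)).length = m.length - (j+1) := by simp
    rw [hlen1, hlen2, hdl3, hn]
    push_cast
    omega

theorem pvDedup2 (a b : Int) (h : a ≠ b) : PySem.List.dedup [a,b] = [a,b] := by
  simp [PySem.List.dedup, PySem.Set.ofList, PySem.Set.add, Ne.symm h]

-- evaluation of the ported list_split on a closed list at two in-range indices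
theorem pvListSplit_eval (m : List Int) (i j : Nat)
    (hcl : PySem.List.pyGet? m 0 = PySem.List.pyGet? m (-1))
    (hij : i < j) (hjn : j + 1 < m.length) (ind0 : List Int)
    (hind0 : ind0 = [(i:Int), (j:Int)] ∨ ind0 = [(j:Int), (i:Int)]) :
    pvListSplit m ind0
      = if i = 0 then [m.take (j+1), m.drop j]
        else [(m.drop i).take (j-i+1), m.drop j ++ (m.take (i+1)).drop 1] := by
  unfold pvListSplit
  have hclb : (PySem.List.pyGet? m 0 == PySem.List.pyGet? m (-1)) = true := by
    simp [hcl]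
  have hnotmem : ((m.length : Int) - 1) ∉ ind0 := by
    rcases hind0 with rfl | rfl <;> · simp; constructor <;> omega
  have hsorted : PySem.List.sorted (PySem.List.dedup ind0) (fun x => x) false = [(i:Int), (j:Int)] := by
    have hne : (i:Int) ≠ (j:Int) := by exact_mod_cast Nat.ne_of_lt hij
    rcases hind0 with rfl | rfl
    · rw [pvDedup2 _ _ hne]
      exact PySem.List.sorted_eq_of_perm_of_pairwise_lt _ _ _ (List.Perm.refl _) (by simpa using (by exact_mod_cast hij : (i:Int) < (j:Int)))
    · rw [pvDedup2 _ _ (Ne.symm hne)]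
      exact PySem.List.sorted_eq_of_perm_of_pairwise_lt _ _ _ (List.Perm.swap _ _ _) (by simpa using (by exact_mod_cast hij : (i:Int) < (j:Int)))
  simp only [hclb, if_true, if_neg hnotmem, hsorted]
  by_cases h0 : i = 0
  · subst h0
    rw [pvRunCase1 m _ j _ rfl (by omega) hjn (by intro k; simp)]
    rw [if_neg (by simp), if_pos rfl]
  · have hi0 : 0 < i := Nat.pos_of_ne_zero h0
    rw [pvRunCase2 m _ i j _ rfl hi0 hij hjn (by intro k; simp)]
    have hnotin : (0:Int) ∉ [(i:Int), (j:Int)] := by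
      simp only [List.mem_cons, List.not_mem_nil, or_false]
      omega
    rw [if_pos ⟨trivial, hnotin⟩, if_neg h0]
    simp [List.getLast!]

-- core equality of the two ports on the already-closed list m
theorem pv_core (m : List Int) (f t : Int) (fi ti : Nat) (hft : f ≠ t)
    (hcl : PySem.List.pyGet? m 0 = PySem.List.pyGet? m (-1))
    (hfi : PySem.List.index? m f = some fi) (hti : PySem.List.index? m t = some ti) :
    ((pvListSplit m [(fi:Int), (ti:Int)]).find?
        (fun s => PySem.List.pyGet? s 0 == some f)).getD []
      = if fi ≤ ti then
          PySem.List.slice m (some (fi:Int)) (some ((ti:Int) + 1))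
        else
          PySem.List.slice m (some (fi:Int)) (some (-1)) ++
            PySem.List.slice m none (some ((ti:Int) + 1)) := by
  obtain ⟨hfilt, hfe, hfmin⟩ := PySem.List.getElem_of_index?_eq_some hfi
  obtain ⟨htilt, hte, htmin⟩ := PySem.List.getElem_of_index?_eq_some hti
  have hn0 : 0 < m.length := by omega
  have hcl0 : m[0]'hn0 = m[m.length - 1]'(by omega) := by
    rw [PySem.List.pyGet?_zero, PySem.List.pyGet?_neg_one] at hcl
    rw [List.getElem?_eq_getElem hn0, List.getLast?_eq_getElem?, List.getElem?_eq_getElem (by omega)] at hcl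
    exact Option.some.injEq _ _ ▸ (by simpa using hcl)
  have hn2 : 2 ≤ m.length := by
    by_contra hc
    have h1 : fi = 0 := by omega
    have h2 : ti = 0 := by omega
    subst h1; subst h2
    exact hft (hfe.symm.trans hte)
  have hfi2 : fi + 1 < m.length := by
    rcases Nat.lt_or_ge (fi+1) m.length with h | h
    · exact h
    · exfalso
      have hfi_eq : fi = m.length - 1 := by omega
      subst hfi_eq
      exact hfmin 0 (by omega) (hcl0.trans hfe)
  have hti2 : ti + 1 < m.length := by
    rcases Nat.lt_or_ge (ti+1) m.length with h | h
    · exact h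
    · exfalso
      have hti_eq : ti = m.length - 1 := by omega
      subst hti_eq
      exact htmin 0 (by omega) (hcl0.trans hte)
  have hfiti : fi ≠ ti := by
    intro hc
    subst hc
    exact hft (hfe.symm.trans hte)
  -- head? facts used by find?
  have hhead_drop : ∀ (a : Nat) (h : a < m.length), PySem.List.pyGet? (m.drop a) 0 = some (m[a]'h) := by
    intro a h
    rw [PySem.List.pyGet?_zero, List.getElem?_drop]
    simp
  have hhead_take : ∀ (k : Nat) (h0 : 0 < k), PySem.List.pyGet? (m.take k) 0 = some (m[0]'hn0) := by
    intro k h0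
    rw [PySem.List.pyGet?_zero, List.getElem?_take]
    simp [h0, List.getElem?_eq_getElem hn0]
  have hhead_dt : ∀ (a k : Nat) (h : a < m.length) (h0 : 0 < k),
      PySem.List.pyGet? ((m.drop a).take k) 0 = some (m[a]'h) := by
    intro a k h h0
    rw [PySem.List.pyGet?_zero, List.getElem?_take]
    simp only [h0]
    rw [List.getElem?_drop]
    simp
  rcases Nat.lt_or_ge fi ti with hlt | hge
  · -- fi < ti : no wraparound
    rw [pvListSplit_eval m fi ti hcl hlt (by omega) _ (Or.inl rfl)]
    rw [if_pos (by exact_mod_cast Nat.le_of_lt hlt : fi ≤ ti)]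
    have hslice : PySem.List.slice m (some (fi:Int)) (some ((ti:Int)+1)) = (m.drop fi).take (ti + 1 - fi) := by
      have : ((ti:Int) + 1) = ((ti + 1 : Nat) : Int) := by push_cast; ring
      rw [this, PySem.List.slice_natCast]
    by_cases hfz : fi = 0
    · subst hfz
      rw [if_pos rfl]
      have hp : (PySem.List.pyGet? (m.take (ti+1)) 0 == some f) = true := by
        rw [hhead_take (ti+1) (by omega)]
        simp [hfe]
      simp only [List.find?_cons, hp, Option.getD_some]
      rw [hslice]
      simp
    · rw [if_neg hfz]
      have hp : (PySem.List.pyGet? ((m.drop fi).take (ti - fi + 1)) 0 == some f) = true := by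
        rw [hhead_dt fi _ (by omega) (by omega)]
        simp [hfe]
      simp only [List.find?_cons, hp, Option.getD_some]
      rw [hslice]
      congr 1
      omega
  · have hgt : ti < fi := by omega
    rw [pvListSplit_eval m ti fi hcl hgt (by omega) _ (Or.inr rfl)]
    rw [if_neg (by exact_mod_cast Nat.not_le.mpr hgt : ¬ (fi ≤ ti))]
    -- B-side slices
    have hs1 : PySem.List.slice m (some (fi:Int)) (some (-1)) = (m.drop fi).take (m.length - 1 - fi) := by
      simp [PySem.List.slice]
      rw [Nat.min_eq_left (by omega)]
    have hs2 : PySem.List.slice m none (some ((ti:Int)+1)) = m.take (ti+1) := by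
      have : ((ti:Int) + 1) = ((ti + 1 : Nat) : Int) := by push_cast; ring
      rw [this, PySem.List.slice_to_natCast]
    rw [hs1, hs2]
    -- common decomposition of m.drop fi
    have hne : m.drop fi ≠ [] := by
      intro hc; have := congrArg List.length hc; simp at this; omega
    have hdlast : (m.drop fi).take (m.length - 1 - fi) = (m.drop fi).dropLast := by
      rw [List.dropLast_eq_take]
      congr 1
      simp
      omega
    have hglast : (m.drop fi).getLast hne = m[0]'hn0 := by
      rw [List.getLast_eq_getElem, List.getElem_drop]
      rw [hcl0]
      congr 1
      simp
      omega
    have hdropfi : m.drop fi = (m.drop fi).take (m.length - 1 - fi) ++ [m[0]'hn0] := by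
      rw [hdlast, ← hglast, List.dropLast_append_getLast hne]
    by_cases htz : ti = 0
    · subst htz
      rw [if_pos rfl]
      have hp1 : (PySem.List.pyGet? (m.take (fi+1)) 0 == some f) = false := by
        rw [hhead_take (fi+1) (by omega)]
        have : m[0]'hn0 = t := hte
        simp [this, Ne.symm hft]
      have hp2 : (PySem.List.pyGet? (m.drop fi) 0 == some f) = true := by
        rw [hhead_drop fi (by omega)]
        simp [hfe]
      simp only [List.find?_cons, hp1, hp2, Option.getD_some]
      have htake1 : m.take (0+1) = [m[0]'hn0] := by
        have h1 : m = m[0]'hn0 :: m.tail := by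
          have := List.drop_eq_getElem_cons hn0; simpa using this
        conv_lhs => rw [h1]
        simp
      rw [htake1, ← hdropfi]
    · rw [if_neg htz]
      have hp1 : (PySem.List.pyGet? ((m.drop ti).take (fi - ti + 1)) 0 == some f) = false := by
        rw [hhead_dt ti _ (by omega) (by omega)]
        simp [hte, Ne.symm hft]
      have hp2 : (PySem.List.pyGet? (m.drop fi ++ (m.take (ti+1)).drop 1) 0 == some f) = true := by
        rw [PySem.List.pyGet?_zero, List.getElem?_append_left (by simp; omega)]
        rw [List.getElem?_drop]
        simp only [Nat.add_zero]
        rw [List.getElem?_eq_getElem hfilt, hfe]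
        simp
      simp only [List.find?_cons, hp1, hp2, Option.getD_some]
      -- m.take (ti+1) = m[0] :: (m.take (ti+1)).drop 1
      have htk : m.take (ti+1) = m[0]'hn0 :: (m.take (ti+1)).drop 1 := by
        have hlen : 0 < (m.take (ti+1)).length := by simp; omega
        have h1 := List.drop_eq_getElem_cons hlen
        simp only [List.drop_zero] at h1
        rw [List.getElem_take] at h1
        simpa using h1
      rw [htk, ← List.singleton_append, ← List.append_assoc, ← hdropfi]
      simp

theorem pv_main (l : List Int) (f t : Int)
    (hpre : Pre_sublist_from_to_items_in_closed_list l f t) :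
    sublist_from_to_items_in_closed_list l f t = sublist_from_to_items_in_closed_list_alt l f t := by
  by_cases hft : f = t
  · simp [sublist_from_to_items_in_closed_list, sublist_from_to_items_in_closed_list_alt, hft]
  · rcases hpre with hft' | ⟨hl, hf, ht⟩
    · exact absurd hft' hft
    unfold sublist_from_to_items_in_closed_list sublist_from_to_items_in_closed_list_alt
    simp only [if_neg hft]
    set m := (if PySem.List.pyGet? l 0 ≠ PySem.List.pyGet? l (-1) then
        l ++ [(PySem.List.pyGet? l 0).getD 0] else l) with hm
    obtain ⟨x, xs, rfl⟩ := List.exists_cons_of_ne_nil hl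
    have hcl : PySem.List.pyGet? m 0 = PySem.List.pyGet? m (-1) := by
      rw [hm]
      by_cases hc : PySem.List.pyGet? (x :: xs) 0 ≠ PySem.List.pyGet? (x :: xs) (-1)
      · rw [if_pos hc]
        rw [PySem.List.pyGet?_zero_cons]
        simp only [Option.getD_some, List.cons_append]
        rw [PySem.List.pyGet?_zero_cons, ← List.cons_append, PySem.List.pyGet?_neg_one_append_singleton]
      · rw [if_neg hc]
        exact not_not.mp hc
    have hsub : (x :: xs) <+: m ∨ m = x :: xs := by
      rw [hm]
      by_cases hc : PySem.List.pyGet? (x :: xs) 0 ≠ PySem.List.pyGet? (x :: xs) (-1)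
      · exact Or.inl (by rw [if_pos hc]; exact List.prefix_append _ _)
      · exact Or.inr (by rw [if_neg hc])
    have hmem : ∀ y : Int, y ∈ x :: xs → y ∈ m := by
      intro y hy
      rcases hsub with hp | he
      · exact hp.subset hy
      · rw [he]; exact hy
    have hfm : f ∈ m := hmem f hf
    have htm : t ∈ m := hmem t ht
    obtain ⟨fi, hfi⟩ := Option.isSome_iff_exists.mp ((PySem.List.index?_isSome_iff m f).mpr hfm)
    obtain ⟨ti, hti⟩ := Option.isSome_iff_exists.mp ((PySem.List.index?_isSome_iff m t).mpr htm)
    rw [hfi, hti]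
    exact pv_core m f t fi ti hft hcl hfi hti

-- ===== VERDICT (by name: the statement is the Claim_ definition above) =====
theorem sublist_from_to_items_in_closed_list_spec : Claim_equal_sublist_from_to_items_in_closed_list := by
  intro l f t _ hpre
  exact pv_main l f t hpre
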